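-- pv_equiv track=rewrite | github.com/dongwei1998/Bert_GRU_Classifier | utils/data_help.py | dispose_number
-- ===== SOURCE A (Python) =====
-- def dispose_number(text_list):
--     lc = ['100', '10']
--     l1 = []
--     l2 = []
--     result = ''
--     flag = False
--     for i in text_list:
--         if i.isdigit():         # 检测字符串是否只由数字组成
--             flag = True
--             if i in lc:
--                 if l1:
--                     l2.append(int(l1[0]) * int(i))
--                 else:
--                     l2.append(int(i))
--                 l1.clear()
--             else:
--                 l1.append(i)
--         else:
--             if flag:    # 是否合并列表中的数字
--                 if l1:
--                     if len(l1) > 8: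
--                         result = result + ''.join(l1) + i
--                     else:
--                         result = result + str(sum(l2) + int(l1[0])) + i
--                 else:
--                     result = result + str(sum(list(set(l2)))) + i   # 去除重复的数字 例如 200，200g  ==》 200g
--                     # result = result + str(sum(l2)) + i
--                 l1.clear()
--                 l2.clear()
--                 flag = False
--             else:
--                 result = result + i
--     return result
-- ===== SOURCE B (Python) =====
-- def dispose_number(text_list):
--     # Run-based reformulation: split the token list into maximal runs of
--     # digit / non-digit tokens; a digit run is folded into an (l1, l2) pair
--     # which is flushed right before the following non-digit run.
--     result = ''
--     pending = None
--     i = 0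
--     n = len(text_list)
--     while i < n:
--         isd = text_list[i].isdigit()
--         j = i
--         while j < n and text_list[j].isdigit() == isd:
--             j += 1
--         run = text_list[i:j]
--         if isd:
--             l1 = []
--             l2 = []
--             for t in run:
--                 if t in ('100', '10'):
--                     l2.append((int(l1[0]) if l1 else 1) * int(t))
--                     l1 = []
--                 else:
--                     l1.append(t)
--             pending = (l1, l2)
--         else:
--             if pending is not None:
--                 l1, l2 = pending
--                 if l1:
--                     result += ''.join(l1) if len(l1) > 8 else str(sum(l2) + int(l1[0]))
--                 else:
--                     result += str(sum(set(l2)))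
--                 pending = None
--             result += ''.join(run)
--         i = j
--     return result
-- ===== Notes on version B (the rewrite author's own statement) =====
-- stated objective: alternative
-- what changed: Replaces A's token-by-token state machine (l1/l2/flag threaded through one loop) by a run segmenter: the list is split into maximal digit/non-digit runs, each digit run is folded into a pending (l1,l2) pair that is flushed just before the next non-digit run; trailing digit runs are dropped because no flush follows.
import Mathlib
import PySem

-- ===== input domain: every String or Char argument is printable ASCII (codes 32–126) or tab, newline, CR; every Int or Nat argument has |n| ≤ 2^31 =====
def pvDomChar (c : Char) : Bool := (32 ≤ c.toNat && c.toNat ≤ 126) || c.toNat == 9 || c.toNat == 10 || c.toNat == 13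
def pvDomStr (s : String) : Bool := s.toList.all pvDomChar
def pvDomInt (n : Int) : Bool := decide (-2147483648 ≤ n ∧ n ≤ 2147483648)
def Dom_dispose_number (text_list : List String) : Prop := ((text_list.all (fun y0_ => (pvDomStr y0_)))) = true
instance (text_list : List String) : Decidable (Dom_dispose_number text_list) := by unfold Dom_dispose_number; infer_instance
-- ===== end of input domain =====

-- B replaces A's token-by-token state machine by a run segmenter over maximal
-- digit/non-digit runs (alternative decomposition, same cost, same values).

-- int(s); both programs only call it on strings that passed isdigit(), where ofStr? is some
def pyint (s : String) : Int := (PySem.Int.ofStr? s).getD 0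

-- ===== PORT A =====
def dnStepA (st : List String × List Int × String × Bool) (i : String) :
    List String × List Int × String × Bool :=
  match st with
  | (l1, l2, result, flag) =>
    if PySem.Str.strIsdigit i then
      if i = "100" ∨ i = "10" then
        if l1 ≠ [] then ([], l2 ++ [pyint (l1.headD "") * pyint i], result, true)
        else ([], l2 ++ [pyint i], result, true)
      else (l1 ++ [i], l2, result, true)
    else
      if flag then
        if l1 ≠ [] then
          if l1.length > 8 then ([], [], result ++ PySem.Str.join "" l1 ++ i, false)
          else ([], [], result ++ PySem.Int.toStr (l2.sum + pyint (l1.headD "")) ++ i, false)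
        else ([], [], result ++ PySem.Int.toStr (PySem.Set.ofList l2).sum ++ i, false)
      else (l1, l2, result ++ i, flag)

def dispose_number (text_list : List String) : String :=
  (text_list.foldl dnStepA ([], [], "", false)).2.2.1

-- ===== PORT B =====
def dnDigitStep (p : List String × List Int) (t : String) : List String × List Int :=
  if t = "100" ∨ t = "10" then
    ([], p.2 ++ [(if p.1 ≠ [] then pyint (p.1.headD "") else 1) * pyint t])
  else (p.1 ++ [t], p.2)

def dnFlush (p : List String × List Int) : String :=
  if p.1 ≠ [] then
    if p.1.length > 8 then PySem.Str.join "" p.1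
    else PySem.Int.toStr (p.2.sum + pyint (p.1.headD ""))
  else PySem.Int.toStr (PySem.Set.ofList p.2).sum

def dnLoop (result : String) (pending : Option (List String × List Int)) (rem : List String) : String :=
  match rem with
  | [] => result
  | x :: xs =>
    if PySem.Str.strIsdigit x then
      dnLoop result
        (some ((x :: xs.takeWhile (fun t => PySem.Str.strIsdigit t == PySem.Str.strIsdigit x)).foldl dnDigitStep ([], [])))
        (xs.dropWhile (fun t => PySem.Str.strIsdigit t == PySem.Str.strIsdigit x))
    else
      dnLoop ((match pending with
               | some p => result ++ dnFlush p
               | none => result) ++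
              PySem.Str.join "" (x :: xs.takeWhile (fun t => PySem.Str.strIsdigit t == PySem.Str.strIsdigit x)))
        none (xs.dropWhile (fun t => PySem.Str.strIsdigit t == PySem.Str.strIsdigit x))
termination_by rem.length
decreasing_by
  all_goals
    (have h := List.length_dropWhile_le (fun t => PySem.Str.strIsdigit t == PySem.Str.strIsdigit x) xs;
     simp only [List.length_cons]; omega)

def dispose_number_alt (text_list : List String) : String := dnLoop "" none text_list

-- ===== PRECONDITION & SPEC =====
def Spec_dispose_number (text_list : List String) (out : String) : Prop := out = dispose_number_alt text_list
instance (text_list : List String) (out : String) : Decidable (Spec_dispose_number text_list out) := by unfold Spec_dispose_number; infer_instance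

-- ===== CLAIM (what is proved, stated in full; the proofs are below) =====
def Claim_equal_dispose_number : Prop := ∀ (text_list : List String), Dom_dispose_number text_list → Spec_dispose_number text_list (dispose_number text_list)

-- ===== LEMMAS AND PROOFS =====

-- a reference machine: A's loop written as structural recursion building the result on the right
def dnC : List String → List Int → Bool → List String → String
  | _, _, _, [] => ""
  | l1, l2, flag, x :: xs =>
    if PySem.Str.strIsdigit x then
      dnC (dnDigitStep (l1, l2) x).1 (dnDigitStep (l1, l2) x).2 true xs
    else
      if flag then dnFlush (l1, l2) ++ (x ++ dnC [] [] false xs)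
      else x ++ dnC l1 l2 false xs

theorem stepA_digit (l1 : List String) (l2 : List Int) (res : String) (flag : Bool) (x : String)
    (hx : PySem.Str.strIsdigit x = true) :
    dnStepA (l1, l2, res, flag) x = ((dnDigitStep (l1, l2) x).1, (dnDigitStep (l1, l2) x).2, res, true) := by
  have hx' : PySem.Chars.strIsdigit x.toList = true := by simpa [PySem.Str.strIsdigit] using hx
  by_cases hc : x = "100" ∨ x = "10" <;> by_cases h1 : l1 = [] <;>
    simp [dnStepA, dnDigitStep, hx', hc, h1, one_mul]

theorem stepA_flush (l1 : List String) (l2 : List Int) (res : String) (x : String)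
    (hx : PySem.Str.strIsdigit x = false) :
    dnStepA (l1, l2, res, true) x = ([], [], res ++ dnFlush (l1, l2) ++ x, false) := by
  have hx' : PySem.Chars.strIsdigit x.toList = false := by simpa [PySem.Str.strIsdigit] using hx
  by_cases h1 : l1 = [] <;> by_cases h8 : 8 < l1.length <;>
    simp [dnStepA, dnFlush, hx', h1, h8]

theorem stepA_text (l1 : List String) (l2 : List Int) (res : String) (x : String)
    (hx : PySem.Str.strIsdigit x = false) :
    dnStepA (l1, l2, res, false) x = (l1, l2, res ++ x, false) := by
  have hx' : PySem.Chars.strIsdigit x.toList = false := by simpa [PySem.Str.strIsdigit] using hx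
  simp [dnStepA, hx']

theorem foldA_eq_dnC (xs : List String) :
    ∀ (l1 : List String) (l2 : List Int) (res : String) (flag : Bool),
      (xs.foldl dnStepA (l1, l2, res, flag)).2.2.1 = res ++ dnC l1 l2 flag xs := by
  induction xs with
  | nil => intro l1 l2 res flag; simp [dnC, String.append_empty]
  | cons x xs ih =>
    intro l1 l2 res flag
    rw [List.foldl_cons]
    cases hx : PySem.Str.strIsdigit x with
    | true =>
      have hx' : PySem.Chars.strIsdigit x.toList = true := by simpa [PySem.Str.strIsdigit] using hx
      rw [stepA_digit l1 l2 res flag x hx, ih]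
      simp [dnC, hx']
    | false =>
      have hx' : PySem.Chars.strIsdigit x.toList = false := by simpa [PySem.Str.strIsdigit] using hx
      cases flag with
      | true => rw [stepA_flush l1 l2 res x hx, ih]; simp [dnC, hx', String.append_assoc]
      | false => rw [stepA_text l1 l2 res x hx, ih]; simp [dnC, hx', String.append_assoc]

theorem joinEmpty_cons (x : String) (r : List String) :
    PySem.Str.join "" (x :: r) = x ++ PySem.Str.join "" r := by
  have h : ∀ (y : List Char) (s : List (List Char)),
      List.intercalate [] (y :: s) = y ++ List.intercalate [] s := by
    intro y s; cases s <;> simp [List.intercalate]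
  simp [PySem.Str.join, PySem.Chars.join, h, String.ofList_append]

theorem joinEmpty_nil : PySem.Str.join "" ([] : List String) = "" := by
  simp [PySem.Str.join, PySem.Chars.join, List.intercalate]


-- a digit run is absorbed into the (l1, l2) pair by folding dnDigitStep
theorem dnC_digit_run (r : List String) :
    ∀ (l1 : List String) (l2 : List Int) (xs : List String),
      (∀ t ∈ r, PySem.Str.strIsdigit t = true) →
      dnC l1 l2 true (r ++ xs) =
        dnC (r.foldl dnDigitStep (l1, l2)).1 (r.foldl dnDigitStep (l1, l2)).2 true xs := by
  induction r with
  | nil => intro l1 l2 xs _; rfl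
  | cons t r ih =>
    intro l1 l2 xs hall
    have ht : PySem.Chars.strIsdigit t.toList = true := by
      simpa [PySem.Str.strIsdigit] using hall t (by simp)
    rw [List.cons_append]
    have h1 : dnC l1 l2 true (t :: (r ++ xs)) =
        dnC (dnDigitStep (l1, l2) t).1 (dnDigitStep (l1, l2) t).2 true (r ++ xs) := by
      simp [dnC, ht]
    rw [h1, ih _ _ xs (fun u hu => hall u (by simp [hu])), List.foldl_cons]

-- a non-digit run is appended verbatim (the state is unchanged)
theorem dnC_text_run (r : List String) :
    ∀ (l1 : List String) (l2 : List Int) (xs : List String),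
      (∀ t ∈ r, PySem.Str.strIsdigit t = false) →
      dnC l1 l2 false (r ++ xs) = PySem.Str.join "" r ++ dnC l1 l2 false xs := by
  induction r with
  | nil => intro l1 l2 xs _; simp [joinEmpty_nil, String.empty_append]
  | cons t r ih =>
    intro l1 l2 xs hall
    have ht : PySem.Chars.strIsdigit t.toList = false := by
      simpa [PySem.Str.strIsdigit] using hall t (by simp)
    rw [List.cons_append]
    have h1 : dnC l1 l2 false (t :: (r ++ xs)) = t ++ dnC l1 l2 false (r ++ xs) := by
      simp [dnC, ht]
    rw [h1, ih _ _ xs (fun u hu => hall u (by simp [hu])), joinEmpty_cons, String.append_assoc]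

theorem head_dropWhile_false {α : Type} (p : α → Bool) (l : List α) (x : α) (t : List α)
    (h : l.dropWhile p = x :: t) : p x = false := by
  induction l with
  | nil => simp at h
  | cons a l ih =>
    rw [List.dropWhile_cons] at h
    split at h
    · exact ih h
    · cases h; simp_all

theorem dnLoop_cons_digit (res : String) (pending : Option (List String × List Int))
    (x : String) (xs : List String) (hx : PySem.Str.strIsdigit x = true) :
    dnLoop res pending (x :: xs) =
      dnLoop res
        (some ((x :: xs.takeWhile (fun t => PySem.Str.strIsdigit t == true)).foldl dnDigitStep ([], [])))
        (xs.dropWhile (fun t => PySem.Str.strIsdigit t == true)) := by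
  rw [dnLoop.eq_def]
  simp only [hx]
  simp

theorem dnLoop_cons_text (res : String) (pending : Option (List String × List Int))
    (x : String) (xs : List String) (hx : PySem.Str.strIsdigit x = false) :
    dnLoop res pending (x :: xs) =
      dnLoop ((match pending with
               | some p => res ++ dnFlush p
               | none => res) ++
              PySem.Str.join "" (x :: xs.takeWhile (fun t => PySem.Str.strIsdigit t == false)))
        none (xs.dropWhile (fun t => PySem.Str.strIsdigit t == false)) := by
  rw [dnLoop.eq_def]
  simp only [hx]
  simp

theorem dnLoop_eq_dnC (n : Nat) :
    ∀ (rem : List String), rem.length ≤ n →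
      (∀ res, dnLoop res none rem = res ++ dnC [] [] false rem) ∧
      (∀ res (p : List String × List Int),
        (∀ y ys, rem = y :: ys → PySem.Str.strIsdigit y = false) →
        dnLoop res (some p) rem = res ++ dnC p.1 p.2 true rem) := by
  induction n with
  | zero =>
    intro rem hlen
    have hnil : rem = [] := List.eq_nil_of_length_eq_zero (Nat.le_zero.mp hlen)
    subst hnil
    exact ⟨fun res => by simp [dnLoop, dnC, String.append_empty],
           fun res p _ => by simp [dnLoop, dnC, String.append_empty]⟩
  | succ n ih =>
    intro rem hlen
    cases rem with
    | nil =>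
      exact ⟨fun res => by simp [dnLoop, dnC, String.append_empty],
             fun res p _ => by simp [dnLoop, dnC, String.append_empty]⟩
    | cons x xs =>
      constructor
      · intro res
        cases hx : PySem.Str.strIsdigit x with
        | true =>
          have hx' : PySem.Chars.strIsdigit x.toList = true := by
            simpa [PySem.Str.strIsdigit] using hx
          have hsplit := List.takeWhile_append_dropWhile
            (p := fun t => PySem.Str.strIsdigit t == true) (l := xs)
          have hdwlen : (xs.dropWhile (fun t => PySem.Str.strIsdigit t == true)).length ≤ n := by
            have := List.length_dropWhile_le (fun t => PySem.Str.strIsdigit t == true) xs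
            simp only [List.length_cons] at hlen; omega
          have hheads : ∀ y ys,
              xs.dropWhile (fun t => PySem.Str.strIsdigit t == true) = y :: ys →
              PySem.Str.strIsdigit y = false := by
            intro y ys hy
            have h2 := head_dropWhile_false _ _ _ _ hy
            simpa using h2
          have htw : ∀ t ∈ xs.takeWhile (fun t => PySem.Str.strIsdigit t == true),
              PySem.Str.strIsdigit t = true := by
            intro t htmem
            simpa using List.mem_takeWhile_imp htmem
          rw [dnLoop_cons_digit res none x xs hx]
          rw [(ih _ hdwlen).2 res _ hheads]
          congr 1
          have hxs := dnC_digit_run (xs.takeWhile (fun t => PySem.Str.strIsdigit t == true))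
            (dnDigitStep ([], []) x).1 (dnDigitStep ([], []) x).2
            (xs.dropWhile (fun t => PySem.Str.strIsdigit t == true)) htw
          rw [Prod.mk.eta] at hxs
          rw [hsplit] at hxs
          have hstep : dnC [] [] false (x :: xs) =
              dnC (dnDigitStep ([], []) x).1 (dnDigitStep ([], []) x).2 true xs := by
            simp [dnC, hx']
          rw [hstep, hxs, List.foldl_cons]
        | false =>
          have hx' : PySem.Chars.strIsdigit x.toList = false := by
            simpa [PySem.Str.strIsdigit] using hx
          have hsplit := List.takeWhile_append_dropWhile
            (p := fun t => PySem.Str.strIsdigit t == false) (l := xs)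
          have hdwlen : (xs.dropWhile (fun t => PySem.Str.strIsdigit t == false)).length ≤ n := by
            have := List.length_dropWhile_le (fun t => PySem.Str.strIsdigit t == false) xs
            simp only [List.length_cons] at hlen; omega
          have htw : ∀ t ∈ xs.takeWhile (fun t => PySem.Str.strIsdigit t == false),
              PySem.Str.strIsdigit t = false := by
            intro t htmem
            simpa using List.mem_takeWhile_imp htmem
          rw [dnLoop_cons_text res none x xs hx]
          rw [(ih _ hdwlen).1]
          have hxs := dnC_text_run (xs.takeWhile (fun t => PySem.Str.strIsdigit t == false))
            [] [] (xs.dropWhile (fun t => PySem.Str.strIsdigit t == false)) htw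
          rw [hsplit] at hxs
          have hstep : dnC [] [] false (x :: xs) = x ++ dnC [] [] false xs := by
            simp [dnC, hx']
          rw [hstep, hxs, joinEmpty_cons]
          simp [String.append_assoc]
      · intro res p hhead
        have hx : PySem.Str.strIsdigit x = false := hhead x xs rfl
        have hx' : PySem.Chars.strIsdigit x.toList = false := by
          simpa [PySem.Str.strIsdigit] using hx
        have hsplit := List.takeWhile_append_dropWhile
          (p := fun t => PySem.Str.strIsdigit t == false) (l := xs)
        have hdwlen : (xs.dropWhile (fun t => PySem.Str.strIsdigit t == false)).length ≤ n := by
          have := List.length_dropWhile_le (fun t => PySem.Str.strIsdigit t == false) xs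
          simp only [List.length_cons] at hlen; omega
        have htw : ∀ t ∈ xs.takeWhile (fun t => PySem.Str.strIsdigit t == false),
            PySem.Str.strIsdigit t = false := by
          intro t htmem
          simpa using List.mem_takeWhile_imp htmem
        rw [dnLoop_cons_text res (some p) x xs hx]
        rw [(ih _ hdwlen).1]
        have hxs := dnC_text_run (xs.takeWhile (fun t => PySem.Str.strIsdigit t == false))
          [] [] (xs.dropWhile (fun t => PySem.Str.strIsdigit t == false)) htw
        rw [hsplit] at hxs
        have hstep : dnC p.1 p.2 true (x :: xs) =
            dnFlush (p.1, p.2) ++ (x ++ dnC [] [] false xs) := by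
          simp [dnC, hx']
        rw [hstep, hxs, joinEmpty_cons, Prod.mk.eta]
        simp [String.append_assoc]

-- ===== VERDICT (by name: the statement is the Claim_ definition above) =====
theorem dispose_number_spec : Claim_equal_dispose_number := by
  intro text_list _
  unfold Spec_dispose_number dispose_number dispose_number_alt
  rw [foldA_eq_dnC]
  rw [(dnLoop_eq_dnC text_list.length text_list le_rfl).1 ""]
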